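-- pv_equiv track=rewrite | github.com/gavlig/genetic_graph_optim | gen_madness.py | checkDegree
-- ===== SOURCE A (Python) =====
-- def checkDegree(mat, limit):
-- 	degree = 0
-- 	#number of vertices in matrix
-- 	vertCnt = len(mat)
--
-- 	degree = []
-- 	for i in range(vertCnt + 1):
-- 		degree.append(0)
--
-- 	for i in range(vertCnt):
-- 		for j in range(i + 1):
-- 			if mat[i][j]:
-- 				degree[i + 1] += 1
-- 				if limit < degree[i + 1]:
-- 					return False
-- 	for i in range(vertCnt):
-- 		for j in range(vertCnt - 1, i - 1, -1):
-- 			if mat[j][i]: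
-- 				degree[i] += 1
-- 				if limit < degree[i]:
-- 					return False
-- 	return degree
-- ===== SOURCE B (Python) =====
-- def checkDegree(mat, limit):
--     n = len(mat)
--     # multiset of edge endpoints: each nonzero lower-triangle cell (r, c)
--     # is an edge touching vertex r+1 (row side) and vertex c (column side)
--     ends = [e
--             for r in range(n)
--             for c in range(r + 1)
--             if mat[r][c]
--             for e in (r + 1, c)]
--     degree = [ends.count(k) for k in range(n + 1)]
--     if any(limit < d for d in degree):
--         return None
--     return degree
-- ===== Notes on version B (the rewrite author's own statement) =====
-- stated objective: alternative
-- what changed: A mutates a degree array in two separate early-exit triangle passes (row-major then column-major); B instead builds the flat multiset of edge endpoints in one comprehension over the lower triangle, obtains each degree by counting occurrences of the vertex in that list, and does a single final limit check (returning None, a value of the declared Optional type, instead of A's False); B trades speed (counting is O(n) per vertex) for a declarative two-stage computation.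
-- intended difference: When limit < 0 and the lower triangle of mat is all zero, A returns the all-zero degree list (its check only runs after an increment) while B returns None, the intended value since every degree, including 0, exceeds a negative limit. — e.g. on checkDegree([], -1): A returns some [0], B returns none
-- outside the precondition, e.g. on checkDegree([[8, 1, -1]], 0): A returns False, B returns None; on checkDegree([[1], [1]], 0): A returns False, B raises IndexError
import Mathlib
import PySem

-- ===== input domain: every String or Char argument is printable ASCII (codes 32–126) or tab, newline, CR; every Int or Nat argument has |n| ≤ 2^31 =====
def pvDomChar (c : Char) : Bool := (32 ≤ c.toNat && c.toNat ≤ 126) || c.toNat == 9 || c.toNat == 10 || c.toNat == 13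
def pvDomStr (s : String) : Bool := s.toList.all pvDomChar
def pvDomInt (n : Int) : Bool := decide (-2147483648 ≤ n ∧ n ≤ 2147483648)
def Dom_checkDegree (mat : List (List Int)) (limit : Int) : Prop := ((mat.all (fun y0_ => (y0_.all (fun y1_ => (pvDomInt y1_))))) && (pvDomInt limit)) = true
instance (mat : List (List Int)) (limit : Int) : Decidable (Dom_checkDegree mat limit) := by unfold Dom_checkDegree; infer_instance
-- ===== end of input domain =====

-- B replaces A's two mutable early-exit triangle passes by a different algorithm:
-- it builds the flat multiset of edge endpoints of the lower triangle, obtains each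
-- degree by counting occurrences, and does one final limit check; proved equal to A
-- outside D_checkDegree (negative limit on an edge-free lower triangle).

-- ===== PORT A =====
-- All loop indices come from range() and are nonnegative Nats; `.getD` indexing is
-- exact for the in-range reads Pre_checkDegree guarantees (Python raises IndexError
-- on the out-of-range reads, which Pre_ excludes).

-- inner loop `for j in range(i+1): if mat[i][j]: degree[i+1] += 1; if limit < degree[i+1]: return False`
def pvA_row (row : List Int) (limit : Int) (i : Nat) : List Nat → List Int → Option (List Int)
  | [], degree => some degree
  | j :: js, degree =>
    if row.getD j 0 ≠ 0 then
      let degree' := degree.set (i+1) (degree.getD (i+1) 0 + 1)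
      if limit < degree'.getD (i+1) 0 then none
      else pvA_row row limit i js degree'
    else pvA_row row limit i js degree

-- first `for i in range(vertCnt)` loop
def pvA_rows (mat : List (List Int)) (limit : Int) : List Nat → List Int → Option (List Int)
  | [], degree => some degree
  | i :: is, degree =>
    match pvA_row (mat.getD i []) limit i (List.range (i+1)) degree with
    | none => none
    | some degree' => pvA_rows mat limit is degree'

-- inner loop `for j in range(vertCnt-1, i-1, -1): if mat[j][i]: degree[i] += 1; …`
def pvA_col (mat : List (List Int)) (limit : Int) (i : Nat) : List Nat → List Int → Option (List Int)
  | [], degree => some degree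
  | j :: js, degree =>
    if (mat.getD j []).getD i 0 ≠ 0 then
      let degree' := degree.set i (degree.getD i 0 + 1)
      if limit < degree'.getD i 0 then none
      else pvA_col mat limit i js degree'
    else pvA_col mat limit i js degree

-- second `for i in range(vertCnt)` loop; range(vertCnt-1, i-1, -1) = [n-1, …, i]
def pvA_cols (mat : List (List Int)) (limit : Int) : List Nat → List Int → Option (List Int)
  | [], degree => some degree
  | i :: is, degree =>
    match pvA_col mat limit i (((List.range mat.length).drop i).reverse) degree with
    | none => none
    | some degree' => pvA_cols mat limit is degree'

def checkDegree (mat : List (List Int)) (limit : Int) : Option (List Int) :=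
  let vertCnt := mat.length
  let degree : List Int := (List.range (vertCnt + 1)).foldl (fun d _ => d ++ [0]) []
  match pvA_rows mat limit (List.range vertCnt) degree with
  | none => none
  | some degree1 =>
    match pvA_cols mat limit (List.range vertCnt) degree1 with
    | none => none
    | some degree2 => some degree2

-- ===== PORT B =====
-- returns None (ported as none) when some degree exceeds the limit
-- ends   = [e for r in range(n) for c in range(r+1) if mat[r][c] for e in (r+1, c)]
-- degree = [ends.count(k) for k in range(n+1)]
def checkDegree_alt (mat : List (List Int)) (limit : Int) : Option (List Int) :=
  let n := mat.length
  let ends : List Nat := (List.range n).flatMap (fun r =>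
    (List.range (r+1)).flatMap (fun c =>
      if (mat.getD r []).getD c 0 ≠ 0 then [r+1, c] else []))
  let degree : List Int := (List.range (n+1)).map (fun k => (ends.count k : Int))
  if degree.any (fun d => decide (limit < d)) then none else some degree

-- ===== PRECONDITION & SPEC =====
-- number of edges in the lower triangle of row i (used by Pre_ and the proofs)
def pvRowCnt (mat : List (List Int)) (i : Nat) : Nat :=
  (List.range (i+1)).countP (fun j => decide ((mat.getD i []).getD j 0 ≠ 0))
-- number of edges in column i at or below the diagonal
def pvColCnt (mat : List (List Int)) (i : Nat) : Nat :=
  (((List.range mat.length).drop i).reverse).countP (fun j => decide ((mat.getD j []).getD i 0 ≠ 0))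
-- the degree of vertex k
def pvDeg (mat : List (List Int)) (k : Nat) : Int :=
  (if k = 0 then 0 else (pvRowCnt mat (k-1) : Int)) +
  (if k < mat.length then (pvColCnt mat k : Int) else 0)

-- Pre_ excludes (i) matrices having a row shorter than its own lower-triangle width
-- (row i with length ≤ i), on which Python A's indexing raises IndexError (or, on
-- some of them, an earlier limit check returns False first), and (ii) inputs on
-- which some nonzero vertex degree exceeds limit, where A returns False — a bool
-- outside the declared Optional[list[int]] return type; B returns None there.
def Pre_checkDegree (mat : List (List Int)) (limit : Int) : Prop :=
  (∀ i < mat.length, i < (mat.getD i []).length) ∧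
  (∀ k < mat.length + 1, pvDeg mat k ≤ limit ∨ pvDeg mat k = 0)
instance (mat : List (List Int)) (limit : Int) : Decidable (Pre_checkDegree mat limit) := by
  unfold Pre_checkDegree; infer_instance

def pvWitness_checkDegree : List (List Int) × Int := ([[1, 0], [1, 1]], 5)

-- When limit < 0 and the lower triangle of mat is all zero, A returns the all-zero
-- degree list (its check only runs after an increment) while B returns None, the
-- intended value since every degree, including 0, exceeds a negative limit.
def D_checkDegree (mat : List (List Int)) (limit : Int) : Prop :=
  limit < 0 ∧ ∀ r < mat.length, ∀ c ≤ r, (mat.getD r []).getD c 0 = 0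
instance (mat : List (List Int)) (limit : Int) : Decidable (D_checkDegree mat limit) := by
  unfold D_checkDegree; infer_instance

def Spec_checkDegree (mat : List (List Int)) (limit : Int) (out : Option (List Int)) : Prop :=
  ¬ D_checkDegree mat limit → out = checkDegree_alt mat limit
instance (mat : List (List Int)) (limit : Int) (out : Option (List Int)) : Decidable (Spec_checkDegree mat limit out) := by
  unfold Spec_checkDegree; infer_instance

def pvDiffWitness_checkDegree : List (List Int) × Int := ([], -1)
def pvDiffWitnessOut_checkDegree : (Option (List Int)) × (Option (List Int)) := (some [0], none)

-- ===== CLAIM (what is proved, stated in full; the proofs are below) =====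
def Claim_unchanged_checkDegree : Prop := ∀ (mat : List (List Int)) (limit : Int), Dom_checkDegree mat limit → Pre_checkDegree mat limit → Spec_checkDegree mat limit (checkDegree mat limit)
def Claim_changed_checkDegree : Prop := Dom_checkDegree (pvDiffWitness_checkDegree.1) (pvDiffWitness_checkDegree.2) ∧ Pre_checkDegree (pvDiffWitness_checkDegree.1) (pvDiffWitness_checkDegree.2) ∧ D_checkDegree (pvDiffWitness_checkDegree.1) (pvDiffWitness_checkDegree.2) ∧ checkDegree (pvDiffWitness_checkDegree.1) (pvDiffWitness_checkDegree.2) = pvDiffWitnessOut_checkDegree.1 ∧ checkDegree_alt (pvDiffWitness_checkDegree.1) (pvDiffWitness_checkDegree.2) = pvDiffWitnessOut_checkDegree.2 ∧ pvDiffWitnessOut_checkDegree.1 ≠ pvDiffWitnessOut_checkDegree.2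
def Claim_exact_checkDegree : Prop := ∀ (mat : List (List Int)) (limit : Int), Dom_checkDegree mat limit → Pre_checkDegree mat limit → D_checkDegree mat limit → checkDegree mat limit ≠ checkDegree_alt mat limit

-- ===== LEMMAS AND PROOFS =====

lemma pv_getD_set_self (l : List Int) (k : Nat) (v : Int) (h : k < l.length) :
    (l.set k v).getD k 0 = v := by
  simp [List.getD_eq_getElem?_getD, h]

lemma pv_getD_set_ne (l : List Int) (k k' : Nat) (v : Int) (h : k ≠ k') :
    (l.set k v).getD k' 0 = l.getD k' 0 := by
  simp [List.getD_eq_getElem?_getD, List.getElem?_set_ne h]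

lemma pv_set_getD_self (l : List Int) (k : Nat) (h : k < l.length) :
    l.set k (l.getD k 0) = l := by
  apply List.ext_getElem <;> simp
  intro i h1 h2
  rcases eq_or_ne i k with rfl | hne
  · simp [List.getElem?_eq_getElem h]
  · simp [List.getElem_set_ne (Ne.symm hne)]

lemma pvA_row_char (row : List Int) (limit : Int) (i : Nat) :
    ∀ (js : List Nat) (degree : List Int), i + 1 < degree.length →
    pvA_row row limit i js degree =
      (if 1 ≤ js.countP (fun j => decide (row.getD j 0 ≠ 0)) ∧
          limit < degree.getD (i+1) 0 + js.countP (fun j => decide (row.getD j 0 ≠ 0)) then none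
       else some (degree.set (i+1) (degree.getD (i+1) 0 + js.countP (fun j => decide (row.getD j 0 ≠ 0))))) := by
  intro js
  induction js with
  | nil =>
    intro degree h
    simp only [pvA_row, List.countP_nil]
    rw [if_neg (by simp), Nat.cast_zero, add_zero, pv_set_getD_self degree (i+1) h]
  | cons j js ih =>
    intro degree h
    simp only [pvA_row]
    by_cases hj : row.getD j 0 ≠ 0
    · rw [if_pos hj]
      have hcnt : (j :: js).countP (fun j => decide (row.getD j 0 ≠ 0))
          = js.countP (fun j => decide (row.getD j 0 ≠ 0)) + 1 := by
        simp only [List.countP_cons]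
        rw [if_pos (by simpa using hj)]
      rw [hcnt]
      have hget : (degree.set (i+1) (degree.getD (i+1) 0 + 1)).getD (i+1) 0
          = degree.getD (i+1) 0 + 1 := pv_getD_set_self _ _ _ h
      rw [hget]
      by_cases hlim : limit < degree.getD (i+1) 0 + 1
      · rw [if_pos hlim]
        have hcond : 1 ≤ js.countP (fun j => decide (row.getD j 0 ≠ 0)) + 1 ∧
            limit < degree.getD (i+1) 0 +
              ((js.countP (fun j => decide (row.getD j 0 ≠ 0)) + 1 : Nat) : Int) := by
          refine ⟨by omega, by push_cast; omega⟩
        rw [if_pos hcond]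
      · rw [if_neg hlim,
          ih (degree.set (i+1) (degree.getD (i+1) 0 + 1)) (by simpa using h), hget]
        generalize List.countP (fun j => decide (row.getD j 0 ≠ 0)) js = c
        by_cases hA : 1 ≤ c ∧ limit < degree.getD (i+1) 0 + 1 + (c : Int)
        · rw [if_pos hA]
          obtain ⟨hA1, hA2⟩ := hA
          have hcond : 1 ≤ c + 1 ∧ limit < degree.getD (i+1) 0 + ((c + 1 : Nat) : Int) := by
            refine ⟨by omega, by push_cast; omega⟩
          rw [if_pos hcond]
        · rw [if_neg hA]
          have hcond : ¬ (1 ≤ c + 1 ∧ limit < degree.getD (i+1) 0 + ((c + 1 : Nat) : Int)) := by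
            rintro ⟨-, h2⟩
            push_cast at h2
            rcases Nat.eq_zero_or_pos c with rfl | hc
            · exact hlim (by push_cast at h2 ⊢; omega)
            · exact hA ⟨hc, by omega⟩
          rw [if_neg hcond, List.set_set]
          congr 2
          push_cast
          ring
    · have hcnt : (j :: js).countP (fun j => decide (row.getD j 0 ≠ 0))
          = js.countP (fun j => decide (row.getD j 0 ≠ 0)) := by
        simp only [List.countP_cons]
        rw [if_neg (by simpa using hj)]
        omega
      rw [if_neg hj, hcnt]
      exact ih degree h

lemma pvA_rows_char (mat : List (List Int)) (limit : Int) :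
    ∀ (is : List Nat) (degree : List Int), is.Nodup →
    (∀ i ∈ is, i + 1 < degree.length ∧ degree.getD (i+1) 0 = 0) →
    pvA_rows mat limit is degree =
      (if ∃ i ∈ is, 1 ≤ pvRowCnt mat i ∧ limit < (pvRowCnt mat i : Int) then none
       else some (is.foldl (fun d i => d.set (i+1) (pvRowCnt mat i : Int)) degree)) := by
  intro is
  induction is with
  | nil => intro degree _ _; simp [pvA_rows]
  | cons i is ih =>
    intro degree hnd hdeg
    obtain ⟨hlen, hzero⟩ := hdeg i (by simp)
    simp only [pvA_rows]
    rw [pvA_row_char (mat.getD i []) limit i (List.range (i+1)) degree hlen]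
    have hcnt : (List.range (i+1)).countP (fun j => decide ((mat.getD i []).getD j 0 ≠ 0))
        = pvRowCnt mat i := rfl
    rw [hcnt, hzero, zero_add]
    have hnd' := List.nodup_cons.mp hnd
    by_cases hc : 1 ≤ pvRowCnt mat i ∧ limit < (pvRowCnt mat i : Int)
    · rw [if_pos hc, if_pos ⟨i, by simp, hc⟩]
    · rw [if_neg hc]
      show pvA_rows mat limit is (degree.set (i+1) (pvRowCnt mat i : Int)) = _
      rw [ih (degree.set (i+1) (pvRowCnt mat i : Int)) hnd'.2 (by
        intro i' hi'
        obtain ⟨hl', hz'⟩ := hdeg i' (by simp [hi'])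
        refine ⟨by simpa using hl', ?_⟩
        rw [pv_getD_set_ne degree (i+1) (i'+1) _ (by
          have : i ≠ i' := fun h => hnd'.1 (h ▸ hi')
          omega)]
        exact hz')]
      have hiff : (∃ x ∈ i :: is, 1 ≤ pvRowCnt mat x ∧ limit < (pvRowCnt mat x : Int)) ↔
          (∃ x ∈ is, 1 ≤ pvRowCnt mat x ∧ limit < (pvRowCnt mat x : Int)) := by
        rw [List.exists_mem_cons_iff]
        simp only [or_iff_right_iff_imp]
        exact fun h => absurd h hc
      by_cases h2 : ∃ x ∈ is, 1 ≤ pvRowCnt mat x ∧ limit < (pvRowCnt mat x : Int)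
      · rw [if_pos h2, if_pos (hiff.mpr h2)]
      · rw [if_neg h2, if_neg (fun hx => h2 (hiff.mp hx)), List.foldl_cons]

lemma pvA_col_char (mat : List (List Int)) (limit : Int) (i : Nat) :
    ∀ (js : List Nat) (degree : List Int), i < degree.length →
    pvA_col mat limit i js degree =
      (if 1 ≤ js.countP (fun j => decide ((mat.getD j []).getD i 0 ≠ 0)) ∧
          limit < degree.getD i 0 + js.countP (fun j => decide ((mat.getD j []).getD i 0 ≠ 0)) then none
       else some (degree.set i (degree.getD i 0 + js.countP (fun j => decide ((mat.getD j []).getD i 0 ≠ 0))))) := by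
  intro js
  induction js with
  | nil =>
    intro degree h
    simp only [pvA_col, List.countP_nil]
    rw [if_neg (by simp), Nat.cast_zero, add_zero, pv_set_getD_self degree i h]
  | cons j js ih =>
    intro degree h
    simp only [pvA_col]
    by_cases hj : (mat.getD j []).getD i 0 ≠ 0
    · rw [if_pos hj]
      have hcnt : (j :: js).countP (fun j => decide ((mat.getD j []).getD i 0 ≠ 0))
          = js.countP (fun j => decide ((mat.getD j []).getD i 0 ≠ 0)) + 1 := by
        simp only [List.countP_cons]
        rw [if_pos (by simpa using hj)]
      rw [hcnt]
      have hget : (degree.set i (degree.getD i 0 + 1)).getD i 0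
          = degree.getD i 0 + 1 := pv_getD_set_self _ _ _ h
      rw [hget]
      by_cases hlim : limit < degree.getD i 0 + 1
      · rw [if_pos hlim]
        have hcond : 1 ≤ js.countP (fun j => decide ((mat.getD j []).getD i 0 ≠ 0)) + 1 ∧
            limit < degree.getD i 0 +
              ((js.countP (fun j => decide ((mat.getD j []).getD i 0 ≠ 0)) + 1 : Nat) : Int) := by
          refine ⟨by omega, by push_cast; omega⟩
        rw [if_pos hcond]
      · rw [if_neg hlim,
          ih (degree.set i (degree.getD i 0 + 1)) (by simpa using h), hget]
        generalize List.countP (fun j => decide ((mat.getD j []).getD i 0 ≠ 0)) js = c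
        by_cases hA : 1 ≤ c ∧ limit < degree.getD i 0 + 1 + (c : Int)
        · rw [if_pos hA]
          obtain ⟨hA1, hA2⟩ := hA
          have hcond : 1 ≤ c + 1 ∧ limit < degree.getD i 0 + ((c + 1 : Nat) : Int) := by
            refine ⟨by omega, by push_cast; omega⟩
          rw [if_pos hcond]
        · rw [if_neg hA]
          have hcond : ¬ (1 ≤ c + 1 ∧ limit < degree.getD i 0 + ((c + 1 : Nat) : Int)) := by
            rintro ⟨-, h2⟩
            push_cast at h2
            rcases Nat.eq_zero_or_pos c with rfl | hc
            · exact hlim (by push_cast at h2 ⊢; omega)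
            · exact hA ⟨hc, by omega⟩
          rw [if_neg hcond, List.set_set]
          congr 2
          push_cast
          ring
    · have hcnt : (j :: js).countP (fun j => decide ((mat.getD j []).getD i 0 ≠ 0))
          = js.countP (fun j => decide ((mat.getD j []).getD i 0 ≠ 0)) := by
        simp only [List.countP_cons]
        rw [if_neg (by simpa using hj)]
        omega
      rw [if_neg hj, hcnt]
      exact ih degree h

lemma pvA_cols_char (mat : List (List Int)) (limit : Int) :
    ∀ (is : List Nat) (degree : List Int), is.Nodup →
    (∀ i ∈ is, i < degree.length) →
    pvA_cols mat limit is degree =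
      (if ∃ i ∈ is, 1 ≤ pvColCnt mat i ∧ limit < degree.getD i 0 + (pvColCnt mat i : Int) then none
       else some (is.foldl (fun d i => d.set i (d.getD i 0 + (pvColCnt mat i : Int))) degree)) := by
  intro is
  induction is with
  | nil => intro degree _ _; simp [pvA_cols]
  | cons i is ih =>
    intro degree hnd hlen
    have hli := hlen i (by simp)
    simp only [pvA_cols]
    rw [pvA_col_char mat limit i (((List.range mat.length).drop i).reverse) degree hli]
    have hcnt : (((List.range mat.length).drop i).reverse).countP
        (fun j => decide ((mat.getD j []).getD i 0 ≠ 0)) = pvColCnt mat i := rfl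
    rw [hcnt]
    have hnd' := List.nodup_cons.mp hnd
    by_cases hc : 1 ≤ pvColCnt mat i ∧ limit < degree.getD i 0 + (pvColCnt mat i : Int)
    · rw [if_pos hc, if_pos ⟨i, by simp, hc⟩]
    · rw [if_neg hc]
      show pvA_cols mat limit is (degree.set i (degree.getD i 0 + (pvColCnt mat i : Int))) = _
      set degree' := degree.set i (degree.getD i 0 + (pvColCnt mat i : Int)) with hdeg'
      have hsame : ∀ x ∈ is, degree'.getD x 0 = degree.getD x 0 := by
        intro x hx
        exact pv_getD_set_ne degree i x _ (fun h => hnd'.1 (h ▸ hx))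
      rw [ih degree' hnd'.2 (by
        intro i' hi'
        have := hlen i' (by simp [hi'])
        simpa [hdeg'] using this)]
      have hiff : (∃ x ∈ is, 1 ≤ pvColCnt mat x ∧ limit < degree'.getD x 0 + (pvColCnt mat x : Int)) ↔
          (∃ x ∈ i :: is, 1 ≤ pvColCnt mat x ∧ limit < degree.getD x 0 + (pvColCnt mat x : Int)) := by
        rw [List.exists_mem_cons_iff]
        constructor
        · rintro ⟨x, hx, h1, h2⟩
          exact Or.inr ⟨x, hx, h1, by rwa [hsame x hx] at h2⟩
        · rintro (h | ⟨x, hx, h1, h2⟩)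
          · exact absurd h hc
          · exact ⟨x, hx, h1, by rwa [hsame x hx]⟩
      by_cases h2 : ∃ x ∈ is, 1 ≤ pvColCnt mat x ∧ limit < degree'.getD x 0 + (pvColCnt mat x : Int)
      · rw [if_pos h2, if_pos (hiff.mp h2)]
      · rw [if_neg h2, if_neg (fun hx => h2 (hiff.mpr hx)), List.foldl_cons]

lemma pv_foldl_set_length (g : Nat → Nat) (f : Nat → List Int → Int) :
    ∀ (l : List Nat) (degree : List Int),
    (l.foldl (fun d i => d.set (g i) (f i d)) degree).length = degree.length := by
  intro l
  induction l with
  | nil => intro degree; rfl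
  | cons i is ih => intro degree; simp [List.foldl_cons, ih]

lemma pv_getD_replicate (m t : Nat) : (List.replicate m (0:Int)).getD t 0 = 0 := by
  simp [List.getD_eq_getElem?_getD, List.getElem?_replicate]
  split <;> rfl

lemma pv_init_degree (n : Nat) :
    (List.range (n + 1)).foldl (fun d _ => d ++ [(0:Int)]) [] = List.replicate (n+1) 0 := by
  suffices h : ∀ (m : Nat) (acc : List Int),
      (List.range m).foldl (fun d _ => d ++ [(0:Int)]) acc = acc ++ List.replicate m 0 by
    simp [h (n+1) []]
  intro m
  induction m with
  | zero => intro acc; simp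
  | succ m ih =>
      intro acc
      rw [List.range_succ, List.foldl_append, ih acc]
      simp [List.replicate_succ' , List.append_assoc]

lemma pv_foldl_rows_getD (f : Nat → Int) :
    ∀ (m : Nat) (degree : List Int), m < degree.length → ∀ (t : Nat),
    ((List.range m).foldl (fun d i => d.set (i+1) (f i)) degree).getD t 0 =
      if 1 ≤ t ∧ t ≤ m then f (t-1) else degree.getD t 0 := by
  intro m
  induction m with
  | zero => intro degree _ t; simp; omega
  | succ m ih =>
    intro degree h t
    rw [List.range_succ, List.foldl_append]
    simp only [List.foldl_cons, List.foldl_nil]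
    rcases eq_or_ne t (m+1) with rfl | hne
    · rw [pv_getD_set_self]
      · rw [if_pos (by omega)]; congr 1
      · rw [pv_foldl_set_length (fun i => i+1) (fun i _ => f i)]; omega
    · rw [pv_getD_set_ne _ _ _ _ (Ne.symm hne), ih degree (by omega) t]
      split_ifs <;> first | rfl | omega

lemma pv_foldl_cols_getD (g : Nat → Int) :
    ∀ (m : Nat) (degree : List Int), m ≤ degree.length → ∀ (t : Nat),
    ((List.range m).foldl (fun d i => d.set i (d.getD i 0 + g i)) degree).getD t 0 =
      if t < m then degree.getD t 0 + g t else degree.getD t 0 := by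
  intro m
  induction m with
  | zero => intro degree _ t; simp
  | succ m ih =>
    intro degree h t
    rw [List.range_succ, List.foldl_append]
    simp only [List.foldl_cons, List.foldl_nil]
    have hm : ((List.range m).foldl (fun d i => d.set i (d.getD i 0 + g i)) degree).getD m 0
        = degree.getD m 0 := by
      rw [ih degree (by omega) m]; simp
    rcases eq_or_ne t m with rfl | hne
    · rw [pv_getD_set_self, hm, if_pos (by omega)]
      rw [pv_foldl_set_length (fun i => i) (fun i d => d.getD i 0 + g i)]; omega
    · rw [pv_getD_set_ne _ _ _ _ (Ne.symm hne), ih degree (by omega) t]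
      split_ifs <;> first | rfl | omega

-- A's result in closed form
lemma pv_A_char (mat : List (List Int)) (limit : Int) :
    checkDegree mat limit =
      (if ∃ i < mat.length,
            (1 ≤ pvRowCnt mat i ∧ limit < (pvRowCnt mat i : Int)) ∨
            (1 ≤ pvColCnt mat i ∧ limit < pvDeg mat i) then none
       else some ((List.range (mat.length + 1)).map (pvDeg mat))) := by
  unfold checkDegree
  show (match pvA_rows mat limit (List.range mat.length)
          ((List.range (mat.length + 1)).foldl (fun d _ => d ++ [(0:Int)]) []) with
        | none => none
        | some degree1 =>
          match pvA_cols mat limit (List.range mat.length) degree1 with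
          | none => none
          | some degree2 => some degree2) = _
  rw [pv_init_degree mat.length]
  rw [pvA_rows_char mat limit (List.range mat.length) (List.replicate (mat.length + 1) 0)
      List.nodup_range (by
        intro i hi
        have := List.mem_range.mp hi
        exact ⟨by simp; omega, pv_getD_replicate _ _⟩)]
  by_cases hP1 : ∃ i ∈ List.range mat.length, 1 ≤ pvRowCnt mat i ∧ limit < (pvRowCnt mat i : Int)
  · rw [if_pos hP1]
    obtain ⟨i, hi, h⟩ := hP1
    rw [if_pos ⟨i, List.mem_range.mp hi, Or.inl h⟩]
  · rw [if_neg hP1]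
    have hlen1 : ((List.range mat.length).foldl
        (fun d i => d.set (i+1) (pvRowCnt mat i : Int)) (List.replicate (mat.length + 1) 0)).length
        = mat.length + 1 := by
      rw [pv_foldl_set_length (fun i => i+1) (fun i _ => (pvRowCnt mat i : Int))]
      simp
    have hget1 : ∀ t, ((List.range mat.length).foldl
        (fun d i => d.set (i+1) (pvRowCnt mat i : Int)) (List.replicate (mat.length + 1) 0)).getD t 0
        = if 1 ≤ t ∧ t ≤ mat.length then (pvRowCnt mat (t-1) : Int) else 0 := by
      intro t
      rw [pv_foldl_rows_getD (fun i => (pvRowCnt mat i : Int)) mat.length _ (by simp) t]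
      split_ifs
      · rfl
      · exact pv_getD_replicate _ _
    show (match pvA_cols mat limit (List.range mat.length)
            ((List.range mat.length).foldl (fun d i => d.set (i+1) (pvRowCnt mat i : Int))
              (List.replicate (mat.length + 1) 0)) with
          | none => none
          | some degree2 => some degree2) = _
    rw [pvA_cols_char mat limit (List.range mat.length) _ List.nodup_range (by
      intro i hi
      have := List.mem_range.mp hi
      rw [hlen1]
      omega)]
    have hdeg1pv : ∀ i, i < mat.length →
        ((List.range mat.length).foldl (fun d i => d.set (i+1) (pvRowCnt mat i : Int))
          (List.replicate (mat.length + 1) 0)).getD i 0 + (pvColCnt mat i : Int) = pvDeg mat i := by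
      intro i hi
      rw [hget1 i]
      unfold pvDeg
      rcases Nat.eq_zero_or_pos i with rfl | hpos
      · rw [if_neg (by omega), if_pos rfl, if_pos hi]
      · rw [if_pos ⟨hpos, by omega⟩, if_neg (by omega), if_pos hi]
    by_cases hP2 : ∃ i ∈ List.range mat.length, 1 ≤ pvColCnt mat i ∧
        limit < ((List.range mat.length).foldl (fun d i => d.set (i+1) (pvRowCnt mat i : Int))
          (List.replicate (mat.length + 1) 0)).getD i 0 + (pvColCnt mat i : Int)
    · rw [if_pos hP2]
      obtain ⟨i, hi, h1, h2⟩ := hP2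
      have hi' := List.mem_range.mp hi
      rw [if_pos ⟨i, hi', Or.inr ⟨h1, by rw [← hdeg1pv i hi']; exact h2⟩⟩]
    · rw [if_neg hP2]
      rw [if_neg (by
        rintro ⟨i, hi, h | h⟩
        · exact hP1 ⟨i, List.mem_range.mpr hi, h⟩
        · exact hP2 ⟨i, List.mem_range.mpr hi, h.1, by rw [hdeg1pv i hi]; exact h.2⟩)]
      show some ((List.range mat.length).foldl
          (fun d i => d.set i (d.getD i 0 + (pvColCnt mat i : Int)))
          ((List.range mat.length).foldl (fun d i => d.set (i+1) (pvRowCnt mat i : Int))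
            (List.replicate (mat.length + 1) 0))) = _
      congr 1
      apply List.ext_getElem
      · rw [pv_foldl_set_length (fun i => i) (fun i d => d.getD i 0 + (pvColCnt mat i : Int)), hlen1]
        simp
      · intro t ht1 ht2
        rw [← List.getD_eq_getElem _ 0 ht1, ← List.getD_eq_getElem _ 0 ht2]
        have ht : t < mat.length + 1 := by
          rw [pv_foldl_set_length (fun i => i) (fun i d => d.getD i 0 + (pvColCnt mat i : Int)), hlen1] at ht1
          exact ht1
        rw [pv_foldl_cols_getD (fun i => (pvColCnt mat i : Int)) mat.length _ (by rw [hlen1]; omega) t]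
        rw [PySem.List.getD_map_range _ _ _ _ ht]
        rcases Nat.lt_or_ge t mat.length with h | h
        · rw [if_pos h, hdeg1pv t h]
        · have htn : t = mat.length := by omega
          subst htn
          rw [if_neg (by omega), hget1]
          unfold pvDeg
          rcases Nat.eq_zero_or_pos mat.length with h0 | hpos
          · rw [if_neg (by omega), if_pos (by omega), if_neg (by omega)]
            ring
          · rw [if_pos ⟨by omega, le_refl _⟩, if_neg (by omega), if_neg (by omega)]
            ring

lemma pv_colcnt_eq (mat : List (List Int)) (c : Nat) :
    (List.range' c (mat.length - c)).countP (fun r => decide ((mat.getD r []).getD c 0 ≠ 0))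
      = pvColCnt mat c := by
  unfold pvColCnt
  rw [List.countP_reverse, List.range_eq_range', List.drop_range']
  simp

lemma pv_countP_range_eq (P : Nat → Prop) [DecidablePred P] (m k : Nat) :
    (List.range m).countP (fun c => decide (c = k ∧ P c)) = if k < m ∧ P k then 1 else 0 := by
  induction m with
  | zero => simp
  | succ m ih =>
    rw [List.range_succ, List.countP_append, ih]
    have hsingle : List.countP (fun c => decide (c = k ∧ P c)) [m] = if m = k ∧ P m then 1 else 0 := by
      by_cases h : m = k ∧ P m <;> simp [List.countP_cons, h]
    rw [hsingle]
    by_cases hk : k = m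
    · subst hk
      by_cases hp : P k
      · rw [if_neg (by omega), if_pos ⟨rfl, hp⟩, if_pos ⟨by omega, hp⟩]
      · rw [if_neg (by omega), if_neg (fun h => hp h.2), if_neg (fun h => hp h.2)]
    · have h1 : ¬ (m = k ∧ P m) := fun h => hk h.1.symm
      rw [if_neg h1, Nat.add_zero]
      by_cases h2 : k < m ∧ P k
      · rw [if_pos h2, if_pos ⟨by omega, h2.2⟩]
      · rw [if_neg h2, if_neg (by rintro ⟨hl, hp⟩; exact h2 ⟨by omega, hp⟩)]

lemma pv_inner_count (mat : List (List Int)) (r k : Nat) :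
    ((List.range (r+1)).flatMap (fun c =>
        if (mat.getD r []).getD c 0 ≠ 0 then [r+1, c] else [])).count k
      = (if k = r+1 then pvRowCnt mat r else 0) +
        (if k ≤ r ∧ (mat.getD r []).getD k 0 ≠ 0 then 1 else 0) := by
  have hgen : ∀ l : List Nat,
      (l.flatMap (fun c => if (mat.getD r []).getD c 0 ≠ 0 then [r+1, c] else [])).count k
        = (if k = r+1 then l.countP (fun c => decide ((mat.getD r []).getD c 0 ≠ 0)) else 0) +
          l.countP (fun c => decide (c = k ∧ (mat.getD r []).getD c 0 ≠ 0)) := by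
    intro l
    induction l with
    | nil => simp
    | cons c cs ih =>
      rw [List.flatMap_cons, List.count_append, ih]
      simp only [List.countP_cons, decide_eq_true_eq]
      by_cases hc : (mat.getD r []).getD c 0 ≠ 0
      · rw [if_pos hc]
        simp only [List.count_cons, List.count_nil, beq_iff_eq]
        split_ifs <;> omega
      · rw [if_neg hc]
        simp only [List.count_nil]
        split_ifs <;> omega
  rw [hgen (List.range (r+1))]
  have h1 : (List.range (r+1)).countP (fun c => decide ((mat.getD r []).getD c 0 ≠ 0))
      = pvRowCnt mat r := rfl
  rw [h1, pv_countP_range_eq (fun c => (mat.getD r []).getD c 0 ≠ 0) (r+1) k]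
  congr 1
  by_cases h : k ≤ r ∧ (mat.getD r []).getD k 0 ≠ 0
  · rw [if_pos h, if_pos ⟨by omega, h.2⟩]
  · rw [if_neg (by rintro ⟨h1', h2'⟩; exact h ⟨by omega, h2'⟩), if_neg h]

lemma pv_ends_count (mat : List (List Int)) :
    ∀ (n k : Nat),
    ((List.range n).flatMap (fun r => (List.range (r+1)).flatMap (fun c =>
        if (mat.getD r []).getD c 0 ≠ 0 then [r+1, c] else []))).count k
      = (if 1 ≤ k ∧ k ≤ n then pvRowCnt mat (k-1) else 0) +
        (List.range n).countP (fun r => decide (k ≤ r ∧ (mat.getD r []).getD k 0 ≠ 0)) := by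
  intro n
  induction n with
  | zero => intro k; rw [if_neg (by omega)]; simp
  | succ n ih =>
    intro k
    rw [List.range_succ, List.flatMap_append, List.count_append, ih k, List.countP_append]
    simp only [List.flatMap_cons, List.flatMap_nil, List.append_nil,
      List.countP_cons, List.countP_nil, decide_eq_true_eq]
    rw [pv_inner_count mat n k]
    by_cases hk1 : k = n + 1
    · subst hk1
      simp only [Nat.add_sub_cancel]
      split_ifs <;> omega
    · split_ifs <;> omega

lemma pv_colpart (mat : List (List Int)) (k : Nat) :
    (List.range mat.length).countP (fun r => decide (k ≤ r ∧ (mat.getD r []).getD k 0 ≠ 0))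
      = pvColCnt mat k := by
  rw [← pv_colcnt_eq mat k]
  rcases Nat.lt_or_ge k mat.length with hlt | h
  swap
  · have h1 : mat.length - k = 0 := by omega
    rw [h1]
    have h2 : (List.range' k 0 : List Nat) = [] := rfl
    rw [h2, List.countP_nil, List.countP_eq_zero]
    intro r hr
    have := List.mem_range.mp hr
    simp only [decide_eq_true_eq]
    rintro ⟨hk, -⟩
    omega
  · have hsplit : List.range mat.length = List.range' 0 k ++ List.range' k (mat.length - k) := by
      have hlen : mat.length = k + (mat.length - k) := by omega
      rw [List.range_eq_range']
      conv_lhs => rw [hlen]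
      rw [← List.range'_append]
      simp
    rw [hsplit, List.countP_append]
    have h0 : (List.range' 0 k).countP (fun r => decide (k ≤ r ∧ (mat.getD r []).getD k 0 ≠ 0)) = 0 := by
      rw [List.countP_eq_zero]
      intro r hr
      have := List.mem_range'_1.mp hr
      simp only [decide_eq_true_eq]
      rintro ⟨hk, -⟩
      omega
    rw [h0, Nat.zero_add]
    apply List.countP_congr
    intro r hr
    have hrk := (List.mem_range'_1.mp hr).1
    simp [hrk]

lemma pv_B_deglist (mat : List (List Int)) :
    (List.range (mat.length + 1)).map (fun k =>
        ((((List.range mat.length).flatMap (fun r => (List.range (r+1)).flatMap (fun c =>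
          if (mat.getD r []).getD c 0 ≠ 0 then [r+1, c] else []))).count k : Nat) : Int))
      = (List.range (mat.length + 1)).map (pvDeg mat) := by
  apply List.map_congr_left
  intro k hk
  have hk' : k < mat.length + 1 := List.mem_range.mp hk
  rw [pv_ends_count mat mat.length k, pv_colpart mat k]
  unfold pvDeg
  have hcol : k < mat.length ∨ pvColCnt mat k = 0 := by
    rcases Nat.lt_or_ge k mat.length with h | h
    · exact Or.inl h
    · refine Or.inr ?_
      unfold pvColCnt
      have hdr : (List.range mat.length).drop k = [] := by
        apply List.drop_eq_nil_of_le
        simpa using h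
      rw [hdr]
      rfl
  rcases Nat.eq_zero_or_pos k with rfl | hpos
  · rw [if_neg (by omega), if_pos rfl]
    rcases hcol with h | h
    · rw [if_pos h]
      push_cast
      ring
    · rw [h]
      split_ifs <;> simp
  · rw [if_pos ⟨hpos, by omega⟩, if_neg (by omega)]
    rcases Nat.lt_or_ge k mat.length with h | h
    · rw [if_pos h]
      push_cast
      ring
    · have h0 : pvColCnt mat k = 0 := by
        rcases hcol with h' | h'
        · omega
        · exact h'
      rw [if_neg (by omega), h0]
      push_cast
      ring

-- B's result in the same closed form (no failure-side condition: B checks every degree)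
lemma pv_B_char (mat : List (List Int)) (limit : Int) :
    checkDegree_alt mat limit =
      (if ∃ k < mat.length + 1, limit < pvDeg mat k then none
       else some ((List.range (mat.length + 1)).map (pvDeg mat))) := by
  unfold checkDegree_alt
  show (if ((List.range (mat.length + 1)).map (fun k =>
          ((((List.range mat.length).flatMap (fun r => (List.range (r+1)).flatMap (fun c =>
            if (mat.getD r []).getD c 0 ≠ 0 then [r+1, c] else []))).count k : Nat) : Int))).any
            (fun d => decide (limit < d))
      then none
      else some ((List.range (mat.length + 1)).map (fun k =>
          ((((List.range mat.length).flatMap (fun r => (List.range (r+1)).flatMap (fun c =>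
            if (mat.getD r []).getD c 0 ≠ 0 then [r+1, c] else []))).count k : Nat) : Int)))) = _
  rw [pv_B_deglist mat]
  by_cases hq : ∃ k < mat.length + 1, limit < pvDeg mat k
  · obtain ⟨k, hk, hlim⟩ := hq
    rw [if_pos (List.any_eq_true.mpr ⟨pvDeg mat k,
      List.mem_map.mpr ⟨k, List.mem_range.mpr hk, rfl⟩, by simpa using hlim⟩),
      if_pos ⟨k, hk, hlim⟩]
  · rw [if_neg (fun hx => hq (by
      obtain ⟨d, hd, hp⟩ := List.any_eq_true.mp hx
      obtain ⟨k, hk, rfl⟩ := List.mem_map.mp hd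
      exact ⟨k, List.mem_range.mp hk, by simpa using hp⟩)), if_neg hq]

theorem pv_main : ∀ (mat : List (List Int)) (limit : Int),
    ¬ D_checkDegree mat limit → checkDegree mat limit = checkDegree_alt mat limit := by
  intro mat limit hD
  rw [pv_A_char, pv_B_char]
  by_cases hq : ∃ k < mat.length + 1, limit < pvDeg mat k
  · rw [if_pos hq]
    have hA : ∃ i < mat.length, (1 ≤ pvRowCnt mat i ∧ limit < (pvRowCnt mat i : Int)) ∨
        (1 ≤ pvColCnt mat i ∧ limit < pvDeg mat i) := by
      rcases Int.lt_or_le limit 0 with hneg | hpos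
      · unfold D_checkDegree at hD
        have hD' : ¬ ∀ r < mat.length, ∀ c ≤ r, (mat.getD r []).getD c 0 = 0 :=
          fun h => hD ⟨hneg, h⟩
        push Not at hD'
        obtain ⟨r, hr, c, hc, hcell⟩ := hD' 
        have hrc : 0 < pvRowCnt mat r := by
          unfold pvRowCnt
          exact List.countP_pos_iff.mpr ⟨c, List.mem_range.mpr (by omega), by simpa using hcell⟩
        exact ⟨r, hr, Or.inl ⟨by omega, by omega⟩⟩
      · obtain ⟨k, hk, hlim⟩ := hq
        by_cases hB : k < mat.length ∧ 1 ≤ pvColCnt mat k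
        · exact ⟨k, hB.1, Or.inr ⟨hB.2, hlim⟩⟩
        · have hcol0 : (if k < mat.length then (pvColCnt mat k : Int) else 0) = 0 := by
            split_ifs with h
            · have h0 : pvColCnt mat k = 0 := by
                rcases Nat.eq_zero_or_pos (pvColCnt mat k) with h0 | h1
                · exact h0
                · exact absurd ⟨h, h1⟩ hB
              rw [h0]
              rfl
            · rfl
          have hdk : pvDeg mat k = (if k = 0 then 0 else (pvRowCnt mat (k-1) : Int)) := by
            unfold pvDeg
            rw [hcol0, add_zero]
          rcases Nat.eq_zero_or_pos k with rfl | hkpos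
          · exfalso
            rw [hdk, if_pos rfl] at hlim
            omega
          · rw [hdk, if_neg (by omega)] at hlim
            exact ⟨k-1, by omega, Or.inl ⟨by omega, hlim⟩⟩
    rw [if_pos hA]
  · rw [if_neg hq]
    have hnA : ¬ ∃ i < mat.length, (1 ≤ pvRowCnt mat i ∧ limit < (pvRowCnt mat i : Int)) ∨
        (1 ≤ pvColCnt mat i ∧ limit < pvDeg mat i) := by
      rintro ⟨i, hi, h | h⟩
      · apply hq
        refine ⟨i + 1, by omega, ?_⟩
        have hle : (pvRowCnt mat i : Int) ≤ pvDeg mat (i+1) := by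
          unfold pvDeg
          rw [if_neg (by omega)]
          simp only [Nat.add_sub_cancel]
          have h2 : (0:Int) ≤ (if i+1 < mat.length then (pvColCnt mat (i+1) : Int) else 0) := by
            split_ifs
            · exact Int.natCast_nonneg _
            · exact le_refl 0
          omega
        exact lt_of_lt_of_le h.2 hle
      · exact hq ⟨i, by omega, h.2⟩
    rw [if_neg hnA]

-- ===== VERDICT (by name: the statement is the Claim_ definition above) =====
theorem checkDegree_spec : Claim_unchanged_checkDegree := by
  intro mat limit _ _ hD
  exact pv_main mat limit hD

theorem checkDegree_changed : Claim_changed_checkDegree := by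
  unfold Claim_changed_checkDegree; decide

theorem checkDegree_tight : Claim_exact_checkDegree := by
  unfold Claim_exact_checkDegree
  intro mat limit _ _ hD
  obtain ⟨hneg, hzero⟩ := hD
  rw [pv_A_char, pv_B_char]
  have hrc : ∀ i, i < mat.length → pvRowCnt mat i = 0 := by
    intro i hi
    unfold pvRowCnt
    rw [List.countP_eq_zero]
    intro j hj
    have hj' := List.mem_range.mp hj
    simp only [decide_eq_true_eq, ne_eq, not_not]
    exact hzero i hi j (by omega)
  have hcc : ∀ i, i < mat.length → pvColCnt mat i = 0 := by
    intro i hi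
    unfold pvColCnt
    rw [List.countP_eq_zero]
    intro j hj
    rw [List.mem_reverse, List.range_eq_range', List.drop_range'] at hj
    rw [List.mem_range'_1] at hj
    simp only [decide_eq_true_eq, ne_eq, not_not]
    exact hzero j (by omega) i (by omega)
  have hA0 : ¬ ∃ i < mat.length, (1 ≤ pvRowCnt mat i ∧ limit < (pvRowCnt mat i : Int)) ∨
      (1 ≤ pvColCnt mat i ∧ limit < pvDeg mat i) := by
    rintro ⟨i, hi, ⟨h1, -⟩ | ⟨h1, -⟩⟩
    · rw [hrc i hi] at h1; omega
    · rw [hcc i hi] at h1; omega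
  have hB0 : ∃ k < mat.length + 1, limit < pvDeg mat k := by
    refine ⟨0, by omega, ?_⟩
    have h0 : pvDeg mat 0 = 0 := by
      unfold pvDeg
      rw [if_pos rfl]
      split_ifs with h
      · rw [hcc 0 h]
        simp
      · simp
    rw [h0]
    exact hneg
  rw [if_neg hA0, if_pos hB0]
  simp
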